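-- pv_equiv track=rewrite | github.com/Lencho123/Leetcode-solved-problems | 1572-matrix-diagonal-sum/1572-matrix-diagonal-sum.py | diagonalSum
-- ===== SOURCE A (Python) =====
-- from typing import List
--
-- def diagonalSum(mat: List[List[int]]) -> int:
--     n = len(mat)
--     diag_sum = 0
--     for i in range(n):
--         for j in range(n):
--             if i == j or i+j == n-1:
--                 diag_sum+=mat[i][j]
--     return diag_sum
-- ===== SOURCE B (Python) =====
-- from typing import List
--
-- def diagonalSum(mat: List[List[int]]) -> int:
--     n = len(mat)
--     total = 0
--     for i in range(n):
--         total += mat[i][i] + mat[i][n - 1 - i]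
--     if n % 2 == 1:
--         total -= mat[n // 2][n // 2]
--     return total
-- ===== Notes on version B (the rewrite author's own statement) =====
-- stated objective: faster
-- what changed: Replaced the O(n^2) nested scan of all cells with a single O(n) loop that adds the two diagonal elements of each row and subtracts the center element once when n is odd.
import Mathlib
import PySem

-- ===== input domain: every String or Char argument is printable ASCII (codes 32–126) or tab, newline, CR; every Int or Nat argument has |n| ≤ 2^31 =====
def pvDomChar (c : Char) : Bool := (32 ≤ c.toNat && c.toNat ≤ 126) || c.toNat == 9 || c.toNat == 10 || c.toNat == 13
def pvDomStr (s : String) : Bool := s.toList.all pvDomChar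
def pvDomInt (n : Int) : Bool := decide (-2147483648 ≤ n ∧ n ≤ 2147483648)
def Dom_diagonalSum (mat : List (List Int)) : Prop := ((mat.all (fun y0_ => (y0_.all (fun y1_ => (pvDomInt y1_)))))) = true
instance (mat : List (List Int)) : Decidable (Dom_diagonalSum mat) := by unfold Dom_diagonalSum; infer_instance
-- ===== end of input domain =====

-- B replaces A's nested scan of all cells with a single loop over the rows that adds both
-- diagonal elements and subtracts the center once when n is odd (objective: faster).


-- ===== PORT A =====
def diagonalSum (mat : List (List Int)) : Int :=
  let n : Int := mat.length
  (PySem.List.pyRange 0 n 1).foldl (fun acc i =>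
    (PySem.List.pyRange 0 n 1).foldl (fun acc j =>
      if i = j ∨ i + j = n - 1 then
        acc + PySem.List.pyGetD (PySem.List.pyGetD mat i []) j 0
      else acc) acc) 0

-- ===== PORT B =====
def diagonalSum_alt (mat : List (List Int)) : Int :=
  let n : Int := mat.length
  let total : Int := (PySem.List.pyRange 0 n 1).foldl (fun acc i =>
    acc + PySem.List.pyGetD (PySem.List.pyGetD mat i []) i 0
        + PySem.List.pyGetD (PySem.List.pyGetD mat i []) (n - 1 - i) 0) 0
  if PySem.Int.mod n 2 = 1 then
    total - PySem.List.pyGetD (PySem.List.pyGetD mat (PySem.Int.floordiv n 2) [])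
              (PySem.Int.floordiv n 2) 0
  else total

-- ===== PRECONDITION & SPEC =====
-- Pre_ excludes exactly the ragged matrices on which the Python A (and B alike) raises
-- IndexError: every row must contain both of its accessed diagonal positions.
def Pre_diagonalSum (mat : List (List Int)) : Prop :=
  ∀ i ∈ List.range mat.length,
    i < (mat.getD i []).length ∧ mat.length - 1 - i < (mat.getD i []).length
instance (mat : List (List Int)) : Decidable (Pre_diagonalSum mat) := by
  unfold Pre_diagonalSum; infer_instance
def pvWitness_diagonalSum : List (List Int) := [[1, 2], [3, 4]]

def Spec_diagonalSum (mat : List (List Int)) (out : Int) : Prop := out = diagonalSum_alt mat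
instance (mat : List (List Int)) (out : Int) : Decidable (Spec_diagonalSum mat out) := by unfold Spec_diagonalSum; infer_instance

-- ===== CLAIM (what is proved, stated in full; the proofs are below) =====
def Claim_equal_diagonalSum : Prop := ∀ (mat : List (List Int)), Dom_diagonalSum mat → Pre_diagonalSum mat → Spec_diagonalSum mat (diagonalSum mat)

-- ===== LEMMAS AND PROOFS =====

-- sum over a duplicate-free list of a function supported on at most the two points a, b
theorem sum_two_points (f : Int → Int) :
    ∀ (l : List Int), l.Nodup → ∀ a b : Int,
      (l.map (fun j => if a = j ∨ b = j then f j else 0)).sum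
        = (if a ∈ l then f a else 0) + (if b ∈ l ∧ b ≠ a then f b else 0) := by
  intro l
  induction l with
  | nil => intro _ a b; simp
  | cons x t ih =>
    intro hnd a b
    rcases List.nodup_cons.mp hnd with ⟨hx, hnt⟩
    simp only [List.map_cons, List.sum_cons, ih hnt a b, List.mem_cons]
    by_cases hax : a = x <;> by_cases hbx : b = x
    · subst hax; subst hbx; simp [hx]
    · subst hax
      simp [hx, hbx]
    · subst hbx
      by_cases hamem : a ∈ t
      · simp [hx, hamem, hax, Ne.symm hax]
        ring
      · simp [hx, hamem, hax, Ne.symm hax]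
    · simp [hax, hbx]

-- a conditional accumulation is the sum of the guarded values
theorem foldl_if_add (c : Int → Prop) [DecidablePred c] (f : Int → Int) :
    ∀ (l : List Int) (a : Int),
      l.foldl (fun acc j => if c j then acc + f j else acc) a
        = a + (l.map (fun j => if c j then f j else 0)).sum := by
  intro l
  induction l with
  | nil => intro a; simp
  | cons x t ih =>
    intro a
    simp only [List.foldl_cons, List.map_cons, List.sum_cons, ih]
    split_ifs <;> ring

theorem sum_map_sub_int (xs : List Int) (f g : Int → Int) :
    (xs.map (fun x => f x - g x)).sum = (xs.map f).sum - (xs.map g).sum := by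
  induction xs with
  | nil => simp
  | cons x t ih => simp only [List.map_cons, List.sum_cons, ih]; ring

-- the two ports agree on every matrix (the precondition is only needed for the Python side)
theorem diagonalSum_eq_alt (mat : List (List Int)) : diagonalSum mat = diagonalSum_alt mat := by
  unfold diagonalSum diagonalSum_alt
  simp only []
  set n : Int := (mat.length : Int) with hn
  have hn0 : 0 ≤ n := by simp [hn]
  set v : Int → Int → Int := fun i j => PySem.List.pyGetD (PySem.List.pyGetD mat i []) j 0 with hv
  set R := PySem.List.pyRange 0 n 1 with hR
  -- A's inner loop, for any admitted row index
  have hrow : ∀ (acc : Int), ∀ i ∈ R,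
      R.foldl (fun acc j => if i = j ∨ i + j = n - 1 then acc + v i j else acc) acc
        = acc + ((v i i + v i (n - 1 - i)) - (if n - 1 - i = i then v i i else 0)) := by
    intro acc i hi
    obtain ⟨hi0, hin⟩ := PySem.List.mem_pyRange_one.mp hi
    have hcond : ∀ j, (i = j ∨ i + j = n - 1) ↔ (i = j ∨ (n - 1 - i) = j) := by
      intro j; omega
    simp only [hcond]
    rw [foldl_if_add (fun j => i = j ∨ (n - 1 - i) = j) (v i) R acc]
    rw [sum_two_points (v i) R (PySem.List.nodup_pyRange_one 0 n) i (n - 1 - i)]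
    have hiR : i ∈ R := hi
    have hmR : (n - 1 - i) ∈ R := PySem.List.mem_pyRange_one.mpr (by omega)
    by_cases hmid : n - 1 - i = i
    · simp [hiR, hmid]
    · simp [hiR, hmR, hmid]
  rw [PySem.List.foldl_congr_mem R _ _ 0 hrow]
  rw [PySem.List.foldl_add R (fun i => (v i i + v i (n - 1 - i)) - (if n - 1 - i = i then v i i else 0)) 0]
  -- B's loop
  have hB : R.foldl (fun acc i => acc + v i i + v i (n - 1 - i)) 0
      = 0 + (R.map (fun i => v i i + v i (n - 1 - i))).sum := by
    have := PySem.List.foldl_add R (fun i => v i i + v i (n - 1 - i)) 0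
    simpa [add_assoc] using this
  rw [hB]
  -- split A's sum into B's sum minus the correction sum
  have hsplit : (R.map (fun i => (v i i + v i (n - 1 - i)) - (if n - 1 - i = i then v i i else 0))).sum
      = (R.map (fun i => v i i + v i (n - 1 - i))).sum
        - (R.map (fun i => if n - 1 - i = i then v i i else 0)).sum := by
    exact sum_map_sub_int R (fun i => v i i + v i (n - 1 - i)) (fun i => if n - 1 - i = i then v i i else 0)
  rw [hsplit]
  -- the correction sum is the center element iff n is odd
  by_cases hpar : PySem.Int.mod n 2 = 1
  · -- n odd: the correction sum is exactly the center element
    have hid : PySem.Int.floordiv n 2 * 2 + PySem.Int.mod n 2 = n := PySem.Int.floordiv_mul_add_mod n 2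
    set k := PySem.Int.floordiv n 2 with hk
    have hnk : n = 2 * k + 1 := by omega
    have hkR : k ∈ R := PySem.List.mem_pyRange_one.mpr (by omega)
    have hcorr : (R.map (fun i => if n - 1 - i = i then v i i else 0)).sum = v k k := by
      have hcg : ∀ i ∈ R, (if n - 1 - i = i then v i i else 0) = (if k = i ∨ k = i then v i i else 0) := by
        intro i _; have : (n - 1 - i = i) ↔ (k = i ∨ k = i) := by omega
        simp only [this]
      rw [List.map_congr_left hcg]
      rw [sum_two_points (fun i => v i i) R (PySem.List.nodup_pyRange_one 0 n) k k]
      simp [hkR]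
    have hm : n % 2 = 1 := by rw [← PySem.Int.mod_eq_emod_of_pos (by norm_num : (0:Int) < 2)]; exact hpar
    rw [hcorr]
    simp [hm, hv]
  · -- n even: the correction sum is zero
    have hmod2 := PySem.Int.mod_two_eq n
    have hpar0 : PySem.Int.mod n 2 = 0 := by tauto
    have hid : PySem.Int.floordiv n 2 * 2 + PySem.Int.mod n 2 = n := PySem.Int.floordiv_mul_add_mod n 2
    have hcorr : (R.map (fun i => if n - 1 - i = i then v i i else 0)).sum = 0 := by
      apply List.sum_eq_zero
      intro x hxm
      obtain ⟨i, hiR, hix⟩ := List.mem_map.mp hxm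
      have : ¬ (n - 1 - i = i) := by omega
      simp [this] at hix
      omega
    have hm : n % 2 = 0 := by rw [← PySem.Int.mod_eq_emod_of_pos (by norm_num : (0:Int) < 2)]; exact hpar0
    rw [hcorr]
    simp [hm]

-- ===== VERDICT (by name: the statement is the Claim_ definition above) =====
theorem diagonalSum_spec : Claim_equal_diagonalSum := by
  intro mat _ _
  unfold Spec_diagonalSum
  exact diagonalSum_eq_alt mat
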